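-- pv_equiv track=rewrite | github.com/tommytang2414/exam-quiz | vps_api/fix_questions.py | ca_anchor_pos
-- ===== SOURCE A (Python) =====
-- def ca_anchor_pos(words, ca_text, n):
--     ca_words = ca_text.lower().split()
--     if not ca_words:
--         return -1
--     best = None
--     for n_try in range(1, min(7, len(ca_words) + 1)):
--         anchor = ' '.join(ca_words[:n_try])
--         for start in range(n - n_try + 1):
--             seg = ' '.join(words[start:start + n_try]).lower()
--             if seg == anchor:
--                 extra = 0
--                 limit = len(ca_words) - n_try
--                 remaining = n - start - n_try
--                 for j in range(min(limit, remaining)):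
--                     if words[start + n_try + j].lower() == ca_words[n_try + j]:
--                         extra += 1
--                     else:
--                         break
--                 conf = n_try * 10 + extra
--                 if best is None or conf > best[2]:
--                     best = (start, n_try, conf)
--     return best[0] if best else -1
-- ===== SOURCE B (Python) =====
-- def ca_anchor_pos(words, ca_text, n):
--     # One linear scan over starts: greedy word-wise prefix match length p, then the
--     # best n_try at a start is k = min(6, p) and its confidence is 10*k + (p-k) = 9*k + p.
--     ca_words = ca_text.lower().split()
--     if not ca_words or n <= 0:
--         return -1
--     low = [w.lower() for w in words[:n]]
--     m, size = len(ca_words), len(low)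
--     best = None  # (-conf, k, start); smallest tuple wins = A's first-strict-max order
--     for start in range(size):
--         p = 0
--         while p < m and start + p < size and low[start + p] == ca_words[p]:
--             p += 1
--         if p == 0:
--             continue
--         k = min(6, p)
--         conf = 9 * k + p
--         key = (-conf, k, start)
--         if best is None or key < best:
--             best = key
--     return best[2] if best is not None else -1
-- ===== Notes on version B (the rewrite author's own statement) =====
-- stated objective: alternative
-- what changed: Replaces A's three nested passes (re-joining and lowercasing words[start:start+n_try] for every (n_try, start) pair, plus an extra inner scan) by one scan over starts that computes the greedy word-wise prefix-match length p once per start and derives the best confidence 9*min(6,p)+p and the tie-break key in closed form.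
-- outside the precondition, e.g. on ca_anchor_pos(['a b'], 'a b', 2): A returns 0, B returns -1; on ca_anchor_pos(['a'], 'a b', 5): A raises IndexError, B returns 0
import Mathlib
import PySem

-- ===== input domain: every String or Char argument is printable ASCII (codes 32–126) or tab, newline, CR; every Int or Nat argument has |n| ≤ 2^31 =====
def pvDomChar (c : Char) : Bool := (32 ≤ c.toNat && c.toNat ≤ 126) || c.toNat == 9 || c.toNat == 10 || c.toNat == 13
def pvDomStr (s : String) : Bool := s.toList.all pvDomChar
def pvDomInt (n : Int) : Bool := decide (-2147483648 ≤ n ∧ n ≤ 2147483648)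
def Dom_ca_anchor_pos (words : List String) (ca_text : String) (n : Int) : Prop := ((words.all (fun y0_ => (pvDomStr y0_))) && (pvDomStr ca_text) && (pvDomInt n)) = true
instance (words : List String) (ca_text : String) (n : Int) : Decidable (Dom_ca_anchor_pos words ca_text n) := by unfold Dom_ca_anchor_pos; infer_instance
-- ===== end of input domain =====

-- B replaces A's three nested passes (join-and-compare for each (n_try, start)) by one scan over starts
-- computing the greedy word-wise prefix-match length and the best score in closed form (no string joins).

-- ===== PORT A =====
-- A's inner `for j in range(...): if ...: extra += 1 else: break` loop.
-- Indexing is exact on Pre_ (every index is in range there; the "" defaults are never read).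
def caExtra (words ca_words : List String) (start n_try : Int) : List Int → Int
  | [] => 0
  | j :: js =>
    if PySem.Str.lower (PySem.List.pyGetD words (start + n_try + j) "") == PySem.List.pyGetD ca_words (n_try + j) "" then
      1 + caExtra words ca_words start n_try js
    else 0

def ca_anchor_pos (words : List String) (ca_text : String) (n : Int) : Int :=
  let ca_words := PySem.Str.split₀ (PySem.Str.lower ca_text)
  if ca_words.isEmpty then -1
  else
    let best :=
      (PySem.List.pyRange 1 (min 7 ((ca_words.length : Int) + 1))).foldl (fun best n_try =>
        let anchor := PySem.Str.join " " (PySem.List.slice ca_words (some 0) (some n_try))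
        (PySem.List.pyRange 0 (n - n_try + 1)).foldl (fun best start =>
          if PySem.Str.lower (PySem.Str.join " " (PySem.List.slice words (some start) (some (start + n_try)))) == anchor then
            let extra := caExtra words ca_words start n_try
              (PySem.List.pyRange 0 (min ((ca_words.length : Int) - n_try) (n - start - n_try)))
            let conf := n_try * 10 + extra
            match best with
            | none => some (start, n_try, conf)
            | some b => if conf > b.2.2 then some (start, n_try, conf) else best
          else best) best) (none : Option (Int × Int × Int))
    match best with
    | some b => b.1
    | none => -1

-- ===== PORT B =====
-- B's `while p < m and start + p < size and low[start+p] == ca_words[p]: p += 1` greedy scan.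
def pmatch : List String → List String → Nat
  | w :: ws, c :: cs => if w == c then pmatch ws cs + 1 else 0
  | _, _ => 0

-- Python's `key < best` on the 3-tuples (-conf, k, start).
def keyLt (x y : Int × Int × Int) : Bool :=
  x.1 < y.1 || (x.1 == y.1 && (x.2.1 < y.2.1 || (x.2.1 == y.2.1 && x.2.2 < y.2.2)))

def ca_anchor_pos_alt (words : List String) (ca_text : String) (n : Int) : Int :=
  let ca_words := PySem.Str.split₀ (PySem.Str.lower ca_text)
  if ca_words.isEmpty || decide (n ≤ 0) then -1
  else
    let low := (PySem.List.slice words none (some n)).map PySem.Str.lower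
    let best :=
      (List.range low.length).foldl (fun best start =>
        let p := pmatch (low.drop start) ca_words
        if p = 0 then best
        else
          let k := min 6 p
          let key : Int × Int × Int := (-(9 * (k : Int) + (p : Int)), (k : Int), (start : Int))
          match best with
          | none => some key
          | some b => if keyLt key b then some key else best) (none : Option (Int × Int × Int))
    match best with
    | some b => b.2.2
    | none => -1

-- ===== PRECONDITION & SPEC =====
-- Pre_ excludes n > len(words) (the caller passes its word count as n): there A's extra-counting loop
-- reads past the list (IndexError) or A accidentally equates the joined short slice words[start:start+n_try]
-- with a multi-word anchor; B raises (same scan) or returns the word-wise answer there.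
def Pre_ca_anchor_pos (words : List String) (ca_text : String) (n : Int) : Prop :=
  n ≤ (words.length : Int) ∨ PySem.Str.split₀ (PySem.Str.lower ca_text) = []
instance (words : List String) (ca_text : String) (n : Int) : Decidable (Pre_ca_anchor_pos words ca_text n) := by
  unfold Pre_ca_anchor_pos; infer_instance

def pvWitness_ca_anchor_pos : List String × String × Int := (["hello", "World"], "world peace", 2)

def Spec_ca_anchor_pos (words : List String) (ca_text : String) (n : Int) (out : Int) : Prop := out = ca_anchor_pos_alt words ca_text n
instance (words : List String) (ca_text : String) (n : Int) (out : Int) : Decidable (Spec_ca_anchor_pos words ca_text n out) := by unfold Spec_ca_anchor_pos; infer_instance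

-- ===== CLAIM (what is proved, stated in full; the proofs are below) =====
def Claim_equal_ca_anchor_pos : Prop := ∀ (words : List String) (ca_text : String) (n : Int), Dom_ca_anchor_pos words ca_text n → Pre_ca_anchor_pos words ca_text n → Spec_ca_anchor_pos words ca_text n (ca_anchor_pos words ca_text n)

-- ===== LEMMAS AND PROOFS =====

-- ---- spec-side abbreviations (used only by the proofs) ----
def pvLow (words : List String) (n : Int) : List String :=
  (PySem.List.slice words none (some n)).map PySem.Str.lower

def pvP (low C : List String) (s : Nat) : Nat := pmatch (low.drop s) C
def pvK (low C : List String) (s : Nat) : Nat := min 6 (pvP low C s)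
def pvConf (low C : List String) (s : Nat) : Int := 9 * (pvK low C s : Int) + (pvP low C s : Int)
def pvKT (low C : List String) (s : Nat) : Int × Int × Int :=
  (-(pvConf low C s), (pvK low C s : Int), (s : Int))
def pickStep {α T : Type} (f : α → Option T) (repl : T → T → Bool) (acc : Option T) (x : α) : Option T :=
  match f x with
  | none => acc
  | some v =>
    match acc with
    | none => some v
    | some b => if repl v b then some v else acc

def pvFA (low C : List String) (x : Int × Int) : Option (Int × Int × Int) :=
  if 1 ≤ x.1 ∧ x.1.toNat ≤ pvP low C x.2.toNat then
    some (x.2, x.1, 9 * x.1 + (pvP low C x.2.toNat : Int))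
  else none

def pvReplA (u b : Int × Int × Int) : Bool := decide (u.2.2 > b.2.2)

def pvFB (low C : List String) (s : Nat) : Option (Int × Int × Int) :=
  if 0 < pvP low C s then some (pvKT low C s) else none

-- ---- generic first-pick fold lemmas ----
theorem pick_none {α T : Type} (f : α → Option T) (repl : T → T → Bool) (l : List α) (acc : Option T)
    (h : ∀ x ∈ l, f x = none) : l.foldl (pickStep f repl) acc = acc := by
  induction l generalizing acc with
  | nil => rfl
  | cons x xs ih =>
    have hx := h x (by simp)
    simp only [List.foldl_cons, pickStep, hx]
    exact ih acc (fun y hy => h y (by simp [hy]))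

theorem pick_mem {α T : Type} (f : α → Option T) (repl : T → T → Bool) (l : List α) (acc : Option T) (v : T)
    (h : l.foldl (pickStep f repl) acc = some v) : acc = some v ∨ ∃ x ∈ l, f x = some v := by
  induction l generalizing acc with
  | nil => exact Or.inl h
  | cons x xs ih =>
    simp only [List.foldl_cons] at h
    rcases ih _ h with h' | ⟨y, hy, hfy⟩
    · unfold pickStep at h'
      rcases hfx : f x with _ | w <;> rw [hfx] at h'
      · exact Or.inl h'
      · rcases acc with _ | b
        · simp only [] at h'
          exact Or.inr ⟨x, by simp, by rw [hfx]; exact h'⟩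
        · by_cases hr : repl w b = true
          · simp only [hr, if_true] at h'
            exact Or.inr ⟨x, by simp, by rw [hfx]; exact h'⟩
          · simp only [hr, if_false] at h'
            exact Or.inl h'
    · exact Or.inr ⟨y, by simp [hy], hfy⟩

theorem pick_keeps {α T : Type} (f : α → Option T) (repl : T → T → Bool) (l : List α) (v : T)
    (h : ∀ x ∈ l, ∀ u, f x = some u → repl u v = false) :
    l.foldl (pickStep f repl) (some v) = some v := by
  induction l with
  | nil => rfl
  | cons x xs ih =>
    simp only [List.foldl_cons]
    have hstep : pickStep f repl (some v) x = some v := by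
      unfold pickStep
      rcases hfx : f x with _ | w
      · rfl
      · simp [h x (by simp) w hfx]
    rw [hstep]
    exact ih (fun y hy u hu => h y (by simp [hy]) u hu)

theorem fold_pick {α T : Type} (f : α → Option T) (repl : T → T → Bool) (l₁ l₂ : List α) (x : α) (w : T)
    (hx : f x = some w)
    (h1 : ∀ y ∈ l₁, ∀ u, f y = some u → repl w u = true)
    (h2 : ∀ y ∈ l₂, ∀ u, f y = some u → repl u w = false) :
    (l₁ ++ x :: l₂).foldl (pickStep f repl) none = some w := by
  rw [List.foldl_append, List.foldl_cons]
  have hmid : pickStep f repl (l₁.foldl (pickStep f repl) none) x = some w := by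
    rcases hacc : l₁.foldl (pickStep f repl) (none : Option T) with _ | b
    · simp [pickStep, hx]
    · rcases pick_mem f repl l₁ none b hacc with h' | ⟨y, hy, hfy⟩
      · exact absurd h' (by simp)
      · simp [pickStep, hx, h1 y hy b hfy]
  rw [hmid]
  exact pick_keeps f repl l₂ w h2

-- ---- split₀ produces whitespace-free tokens ----
theorem split_go_no_space (s : List Char) : ∀ (cur : List Char) (acc : List (List Char)),
    (∀ t ∈ acc, ∀ c ∈ t, PySem.Chars.isspace c = false) →
    (∀ c ∈ cur, PySem.Chars.isspace c = false) →
    ∀ t ∈ PySem.Chars.split₀.go s cur acc, ∀ c ∈ t, PySem.Chars.isspace c = false := by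
  induction s with
  | nil =>
    intro cur acc hacc hcur t ht
    unfold PySem.Chars.split₀.go at ht
    by_cases hc : cur.isEmpty
    · simp [hc] at ht
      exact hacc t ht
    · simp [hc] at ht
      rcases ht with ht | ht
      · exact hacc t ht
      · intro c hc'
        exact hcur c (by simpa [ht] using hc')
  | cons c rest ih =>
    intro cur acc hacc hcur t ht
    unfold PySem.Chars.split₀.go at ht
    by_cases hsp : PySem.Chars.isspace c
    · by_cases hc : cur.isEmpty
      · simp [hsp, hc] at ht
        exact ih [] acc hacc (by simp) t ht
      · simp [hsp, hc] at ht
        refine ih [] (cur.reverse :: acc) ?_ (by simp) t ht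
        intro t' ht' c' hc'
        rcases List.mem_cons.mp ht' with h | h
        · exact hcur c' (by simpa [h] using hc')
        · exact hacc t' h c' hc'
    · simp [hsp] at ht
      refine ih (c :: cur) acc hacc ?_ t ht
      intro c' hc'
      rcases List.mem_cons.mp hc' with h | h
      · simpa [h] using (by simpa using hsp)
      · exact hcur c' h

theorem split₀_no_space (s : List Char) (t : List Char) (ht : t ∈ PySem.Chars.split₀ s) :
    ∀ c ∈ t, c ≠ ' ' := by
  intro c hc hcsp
  have h := split_go_no_space s [] [] (by simp) (by simp) t ht c hc
  rw [hcsp] at h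
  exact absurd h (by decide)

-- ---- ' '-join is injective on equal-length lists when one side is space-free ----
theorem count_join_sep (ls : List (List Char)) (h : ls ≠ []) :
    (PySem.Chars.join [' '] ls).count ' ' = (ls.map (List.count ' ')).sum + ls.length - 1 := by
  induction ls with
  | nil => exact absurd rfl h
  | cons a l ih =>
    rcases l with _ | ⟨b, l'⟩
    · simp [PySem.Chars.join_singleton]
    · rw [PySem.Chars.join_cons_cons]
      have := ih (by simp)
      simp only [List.count_append, this]
      simp [List.count_cons]
      omega

theorem sep_split (a : List Char) : ∀ (b x y : List Char),
    (∀ c ∈ a, c ≠ ' ') → (∀ c ∈ b, c ≠ ' ') → a ++ ' ' :: x = b ++ ' ' :: y → a = b ∧ x = y := by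
  induction a with
  | nil =>
    intro b x y _ hb h
    rcases b with _ | ⟨c, b'⟩
    · simpa using h
    · simp at h
      exact absurd h.1.symm (hb c (by simp))
  | cons c a' ih =>
    intro b x y ha hb h
    rcases b with _ | ⟨d, b'⟩
    · simp at h
      exact absurd h.1 (ha c (by simp))
    · simp at h
      obtain ⟨h1, h2⟩ := h
      obtain ⟨h3, h4⟩ := ih b' x y (fun c' hc' => ha c' (by simp [hc'])) (fun c' hc' => hb c' (by simp [hc'])) h2
      exact ⟨by simp [h1, h3], h4⟩

theorem join_inj_aux (ws : List (List Char)) : ∀ (ts : List (List Char)),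
    ws.length = ts.length →
    (∀ w ∈ ws, ∀ c ∈ w, c ≠ ' ') → (∀ t ∈ ts, ∀ c ∈ t, c ≠ ' ') →
    PySem.Chars.join [' '] ws = PySem.Chars.join [' '] ts → ws = ts := by
  induction ws with
  | nil => intro ts hlen _ _ _; simpa using (by simpa using hlen.symm : ts.length = 0)
  | cons w ws' ih =>
    intro ts hlen hws hts hj
    rcases ts with _ | ⟨t, ts'⟩
    · simp at hlen
    · rcases ws' with _ | ⟨w2, ws''⟩
      · rcases ts' with _ | ⟨t2, ts''⟩
        · rw [PySem.Chars.join_singleton, PySem.Chars.join_singleton] at hj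
          simp [hj]
        · simp at hlen
      · rcases ts' with _ | ⟨t2, ts''⟩
        · simp at hlen
        · rw [PySem.Chars.join_cons_cons, PySem.Chars.join_cons_cons] at hj
          have hj' : w ++ ' ' :: PySem.Chars.join [' '] (w2 :: ws'') = t ++ ' ' :: PySem.Chars.join [' '] (t2 :: ts'') := by
            simpa using hj
          obtain ⟨h1, h2⟩ := sep_split w t _ _ (hws w (by simp)) (hts t (by simp)) hj'
          have h3 := ih (t2 :: ts'') (by simpa using hlen)
            (fun w' hw' => hws w' (by simp [hw'])) (fun t' ht' => hts t' (by simp [ht'])) h2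
          simp [h1, h3]

theorem join_inj (ws ts : List (List Char)) (hlen : ws.length = ts.length)
    (hts : ∀ t ∈ ts, ∀ c ∈ t, c ≠ ' ')
    (hj : PySem.Chars.join [' '] ws = PySem.Chars.join [' '] ts) : ws = ts := by
  rcases ws with _ | ⟨w, ws'⟩
  · simpa using (by simpa using hlen.symm : ts.length = 0)
  · -- derive that ws is space-free from the ' '-counts
    have hne : (w :: ws') ≠ ([] : List (List Char)) := by simp
    have htne : ts ≠ [] := by intro h; rw [h] at hlen; simp at hlen
    have hc1 := count_join_sep (w :: ws') hne
    have hc2 := count_join_sep ts htne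
    have hts0 : (ts.map (List.count ' ')).sum = 0 := by
      apply List.sum_eq_zero
      intro x hx
      rcases List.mem_map.mp hx with ⟨t, ht, rfl⟩
      exact List.count_eq_zero.mpr (fun hmem => hts t ht ' ' hmem rfl)
    have hcount : (((w :: ws').map (List.count ' ')).sum : Nat) = 0 := by
      rw [hj] at hc1
      rw [hc2, hts0] at hc1
      have hl : (w :: ws').length = ts.length := hlen
      have hl1 : (w :: ws').length = ws'.length + 1 := by simp
      omega
    have hws : ∀ w' ∈ (w :: ws'), ∀ c ∈ w', c ≠ ' ' := by
      intro w' hw' c hc hceq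
      have : List.count ' ' w' = 0 := by
        have := List.sum_eq_zero_iff.mp hcount  -- sums of naturals
        have h0 := this (List.count ' ' w') (List.mem_map.mpr ⟨w', hw', rfl⟩)
        exact h0
      rw [List.count_eq_zero] at this
      exact this (hceq ▸ hc)
    exact join_inj_aux _ ts hlen hws hts hj

theorem lower_join (ls : List (List Char)) :
    PySem.Chars.lower (PySem.Chars.join [' '] ls) = PySem.Chars.join [' '] (ls.map PySem.Chars.lower) := by
  induction ls with
  | nil => rfl
  | cons a l ih =>
    rcases l with _ | ⟨b, l'⟩
    · simp [PySem.Chars.join_singleton]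
    · have h2 : PySem.Chars.join [' '] ((a :: b :: l').map PySem.Chars.lower)
          = PySem.Chars.lower a ++ [' '] ++ PySem.Chars.join [' '] ((b :: l').map PySem.Chars.lower) := by
        simp only [List.map_cons]
        exact PySem.Chars.join_cons_cons [' '] _ _ _
      rw [PySem.Chars.join_cons_cons, h2, ← ih]
      have hsp : PySem.Chars.lowerChar ' ' = ' ' := by decide
      simp [PySem.Chars.lower, hsp]

-- ---- pmatch characterization ----
theorem pmatch_le (ws cs : List String) : pmatch ws cs ≤ min ws.length cs.length := by
  induction ws generalizing cs with
  | nil => simp [pmatch]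
  | cons w ws' ih =>
    rcases cs with _ | ⟨c, cs'⟩
    · simp [pmatch]
    · by_cases h : (w == c) = true
      · simp only [pmatch, h, if_true]
        have := ih cs'
        simp only [List.length_cons]
        omega
      · simp [pmatch, h]

theorem le_pmatch_iff (a : Nat) (ws cs : List String) :
    a ≤ pmatch ws cs ↔ a ≤ ws.length ∧ a ≤ cs.length ∧ ws.take a = cs.take a := by
  induction a generalizing ws cs with
  | zero => simp
  | succ a' ih =>
    rcases ws with _ | ⟨w, ws'⟩
    · simp [pmatch]
    · rcases cs with _ | ⟨c, cs'⟩
      · simp [pmatch]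
      · by_cases h : (w == c) = true
        · have hwc : w = c := by simpa using h
          simp only [pmatch, h, if_true, List.length_cons, List.take_succ_cons]
          rw [Nat.succ_le_succ_iff, ih ws' cs']
          constructor
          · rintro ⟨h1, h2, h3⟩
            exact ⟨by omega, by omega, by simp [hwc, h3]⟩
          · rintro ⟨h1, h2, h3⟩
            simp at h3
            exact ⟨by omega, by omega, h3.2⟩
        · simp only [pmatch, if_neg h]
          simp only [List.take_succ_cons]
          constructor
          · intro hh; exact absurd hh (by omega)
          · rintro ⟨_, _, h3⟩
            simp at h3
            exact absurd (beq_iff_eq.mpr h3.1) (by simpa using h)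

theorem pmatch_mismatch (ws cs : List String) (h1 : pmatch ws cs < ws.length) (h2 : pmatch ws cs < cs.length) :
    ws[pmatch ws cs]? ≠ cs[pmatch ws cs]? := by
  induction ws generalizing cs with
  | nil => simp at h1
  | cons w ws' ih =>
    rcases cs with _ | ⟨c, cs'⟩
    · simp at h2
    · by_cases h : (w == c) = true
      · simp only [pmatch, h, if_true] at h1 h2 ⊢
        simpa using ih cs' (by simpa using h1) (by simpa using h2)
      · simp only [pmatch, if_neg h]
        simpa using fun hq => absurd (beq_iff_eq.mpr hq) (by simpa using h)

-- ---- slices, lowered word list ----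
theorem pyRange_nil {a b : Int} (h : b ≤ a) : PySem.List.pyRange a b = [] := by
  unfold PySem.List.pyRange
  simp
  omega

theorem pyRange_sorted (a b : Int) : List.Pairwise (· < ·) (PySem.List.pyRange a b) := by
  unfold PySem.List.pyRange
  simp only [if_neg one_ne_zero]
  rw [List.pairwise_map]
  exact List.pairwise_lt_range.imp (by intro x y hxy; omega)

theorem pvLow_eq (words : List String) (n : Int) (hn : 0 ≤ n) :
    pvLow words n = (words.take n.toNat).map PySem.Str.lower := by
  unfold pvLow
  rw [PySem.List.slice_to words hn]

theorem pvLow_length (words : List String) (n : Int) (hn : 0 ≤ n) (hnw : n ≤ (words.length : Int)) :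
    (pvLow words n).length = n.toNat := by
  rw [pvLow_eq words n hn]
  simp
  omega

theorem pvLow_take (words : List String) (n : Int) (hn : 0 ≤ n) (s a : Nat)
    (hsa : s + a ≤ n.toNat) :
    ((pvLow words n).drop s).take a = ((words.drop s).take a).map PySem.Str.lower := by
  rw [pvLow_eq words n hn, ← List.map_drop, ← List.map_take]
  congr 1
  rw [List.drop_take, List.take_take]
  congr 1
  omega

theorem pvLow_getElem? (words : List String) (n : Int) (hn : 0 ≤ n) (i : Nat) (hi : i < n.toNat)
    (hiw : i < words.length) :
    (pvLow words n)[i]? = some (PySem.Str.lower words[i]) := by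
  rw [pvLow_eq words n hn]
  rw [List.getElem?_map]
  rw [List.getElem?_take_of_lt hi]
  simp [List.getElem?_eq_getElem hiw]

-- ---- the seg == anchor test is the word-wise comparison ----
theorem string_toList_inj : Function.Injective String.toList := by
  intro a b h
  exact String.ext_iff.mpr h

theorem segEq_iff (words C : List String)
    (hC : ∀ t ∈ C, ∀ c ∈ t.toList, c ≠ ' ')
    (s a : Nat) (hlen : s + a ≤ words.length) (haC : a ≤ C.length) :
    ((PySem.Str.lower (PySem.Str.join " " (PySem.List.slice words (some (s : Int)) (some ((s : Int) + (a : Int))))) ==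
        PySem.Str.join " " (PySem.List.slice C (some 0) (some (a : Int)))) = true)
    ↔ ((words.drop s).take a).map PySem.Str.lower = C.take a := by
  have hsl : PySem.List.slice words (some (s : Int)) (some ((s : Int) + (a : Int))) = (words.drop s).take a := by
    have h := PySem.List.slice_natCast words s (s + a)
    have hc : ((s + a : Nat) : Int) = (s : Int) + (a : Int) := by push_cast; ring
    rw [← hc, h]
    congr 1
    omega
  have hsr : PySem.List.slice C (some 0) (some (a : Int)) = C.take a := by
    have h := PySem.List.slice_natCast C 0 a
    simpa using h
  rw [hsl, hsr, beq_iff_eq, String.ext_iff]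
  have hL : (PySem.Str.lower (PySem.Str.join " " ((words.drop s).take a))).toList
      = PySem.Chars.join [' '] (((words.drop s).take a).map (fun w => PySem.Chars.lower w.toList)) := by
    simp only [PySem.Str.lower, PySem.Str.join, String.toList_ofList]
    have : (" ").toList = [' '] := by decide
    rw [this, lower_join]
    simp [List.map_map, Function.comp_def]
  have hR : (PySem.Str.join " " (C.take a)).toList = PySem.Chars.join [' '] ((C.take a).map String.toList) := by
    simp only [PySem.Str.join, String.toList_ofList]
    have : (" ").toList = [' '] := by decide
    rw [this]
  rw [hL, hR]
  have hlen1 : (((words.drop s).take a).map (fun w => PySem.Chars.lower w.toList)).length = a := by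
    simp
    omega
  have hlen2 : ((C.take a).map String.toList).length = a := by simp; omega
  constructor
  · intro hj
    have := join_inj _ _ (hlen1.trans hlen2.symm)
      (by
        intro t ht c hc
        rcases List.mem_map.mp ht with ⟨w, hw, rfl⟩
        exact hC w (List.mem_of_mem_take hw) c hc) hj
    -- `this` : map (Chars.lower ∘ toList) ws = map toList (C.take a)
    have h2 : (((words.drop s).take a).map PySem.Str.lower).map String.toList = (C.take a).map String.toList := by
      rw [List.map_map]
      rw [← this]
      apply List.map_congr_left
      intro w _
      simp [PySem.Str.lower, Function.comp, String.toList_ofList]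
    exact List.map_injective_iff.mpr string_toList_inj h2
  · intro he
    have h2 : ((words.drop s).take a).map (fun w => PySem.Chars.lower w.toList)
        = (C.take a).map String.toList := by
      rw [← he, List.map_map]
      apply List.map_congr_left
      intro w _
      simp [PySem.Str.lower, Function.comp, String.toList_ofList]
    rw [h2]

-- ---- key-order helpers ----
def pvLt (low C : List String) (s t : Nat) : Prop :=
  pvConf low C t < pvConf low C s ∨ (pvConf low C s = pvConf low C t ∧
    (pvK low C s < pvK low C t ∨ (pvK low C s = pvK low C t ∧ s < t)))

theorem keyLt_iff (low C : List String) (s t : Nat) :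
    keyLt (pvKT low C s) (pvKT low C t) = true ↔ pvLt low C s t := by
  unfold keyLt pvKT pvLt
  simp only [Bool.or_eq_true, Bool.and_eq_true, decide_eq_true_eq, beq_iff_eq]
  omega

theorem pvLt_trichotomy (low C : List String) (s t : Nat) (h : s ≠ t) : pvLt low C s t ∨ pvLt low C t s := by
  unfold pvLt
  omega

theorem pvLt_trans (low C : List String) (a b c : Nat) (h1 : pvLt low C a b) (h2 : pvLt low C b c) :
    pvLt low C a c := by
  unfold pvLt at *
  omega

def pvStep (low C : List String) (acc : Option Nat) (s : Nat) : Option Nat :=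
  match acc with
  | none => some s
  | some m => if keyLt (pvKT low C s) (pvKT low C m) then some s else acc

def pvArgmin (low C : List String) (l : List Nat) : Option Nat := l.foldl (pvStep low C) none

theorem pvStep_spec (low C : List String) (acc : Option Nat) (x c : Nat)
    (hc : pvStep low C acc x = some c) :
    (c = x ∨ acc = some c) ∧ (∀ d, (d = x ∨ acc = some d) → d ≠ c → pvLt low C c d) := by
  rcases acc with _ | b
  · have hcx : x = c := by simpa [pvStep] using hc
    refine ⟨Or.inl hcx.symm, ?_⟩
    rintro d (rfl | hd) hdc
    · exact absurd hcx hdc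
    · cases hd
  · by_cases hk : keyLt (pvKT low C x) (pvKT low C b) = true
    · have hcx : x = c := by simpa [pvStep, hk] using hc
      refine ⟨Or.inl hcx.symm, ?_⟩
      rintro d (rfl | hd) hdc
      · exact absurd hcx hdc
      · injection hd with hd
        rw [← hcx, ← hd]
        exact (keyLt_iff low C x b).mp hk
    · have hcb : b = c := by simpa [pvStep, hk] using hc
      refine ⟨Or.inr (by rw [hcb]), ?_⟩
      rintro d (rfl | hd) hdc
      · rw [← hcb]
        rcases pvLt_trichotomy low C b d (fun hh => hdc (by rw [← hh, hcb])) with h' | h'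
        · exact h'
        · exact absurd ((keyLt_iff low C d b).mpr h') hk
      · injection hd with hd
        exact absurd (hcb.symm.trans hd).symm hdc

theorem pvArgmin_aux (low C : List String) (l : List Nat) : ∀ (acc : Option Nat) (m : Nat),
    l.foldl (pvStep low C) acc = some m →
    (acc = some m ∨ m ∈ l) ∧ (∀ b, acc = some b → b ≠ m → pvLt low C m b) ∧
      (∀ t ∈ l, t ≠ m → pvLt low C m t) := by
  induction l with
  | nil =>
    intro acc m h
    simp at h
    refine ⟨Or.inl h, ?_, by simp⟩
    intro b hb hbm
    rw [h] at hb
    injection hb with hb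
    exact absurd hb.symm hbm
  | cons x xs ih =>
    intro acc m h
    rw [List.foldl_cons] at h
    rcases hacc' : pvStep low C acc x with _ | c
    · -- the step never yields none
      exfalso
      rcases acc with _ | b
      · simp [pvStep] at hacc'
      · by_cases hk : keyLt (pvKT low C x) (pvKT low C b) = true <;> simp [pvStep, hk] at hacc'
    · rw [hacc'] at h
      obtain ⟨hm1, hm2, hm3⟩ := ih _ m h
      obtain ⟨hc1, hc2⟩ := pvStep_spec low C acc x c hacc'
      have hmc : c = m ∨ pvLt low C m c := by
        by_cases hcm : c = m
        · exact Or.inl hcm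
        · exact Or.inr (hm2 c rfl hcm)
      constructor
      · rcases hm1 with h' | h'
        · injection h' with h'
          subst h'
          rcases hc1 with h'' | h''
          · exact Or.inr (by simp [h''])
          · exact Or.inl h''
        · exact Or.inr (by simp [h'])
      refine ⟨?_, ?_⟩
      · intro b hb hbm
        subst hb
        by_cases hbc : b = c
        · subst hbc
          rcases hmc with h' | h'
          · exact absurd h' hbm
          · exact h'
        · have h1 := hc2 b (Or.inr rfl) hbc
          rcases hmc with h' | h'
          · subst h'
            exact h1
          · exact pvLt_trans low C m c b h' h1
      · intro t ht htm
        rcases List.mem_cons.mp ht with h' | h'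
        · subst h'
          by_cases htc : t = c
          · subst htc
            rcases hmc with h' | h'
            · exact absurd h' htm
            · exact h'
          · have h1 := hc2 t (Or.inl rfl) htc
            rcases hmc with h' | h'
            · subst h'
              exact h1
            · exact pvLt_trans low C m c t h' h1
        · exact hm3 t h' htm

theorem pvArgmin_some (low C : List String) (l : List Nat) (h : l ≠ []) :
    ∃ m, pvArgmin low C l = some m := by
  have haux : ∀ (l' : List Nat) (b : Nat), ∃ m, l'.foldl (pvStep low C) (some b) = some m := by
    intro l'
    induction l' with
    | nil => intro b; exact ⟨b, rfl⟩
    | cons x xs ih =>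
      intro b
      rw [List.foldl_cons]
      rcases hst : pvStep low C (some b) x with _ | c
      · by_cases hk : keyLt (pvKT low C x) (pvKT low C b) = true <;> simp [pvStep, hk] at hst
      · exact ih c
  rcases l with _ | ⟨x, xs⟩
  · exact absurd rfl h
  · unfold pvArgmin
    rw [List.foldl_cons]
    show ∃ m, xs.foldl (pvStep low C) (some x) = some m
    exact haux xs x

theorem pvArgmin_spec (low C : List String) (l : List Nat) (m : Nat) (h : pvArgmin low C l = some m) :
    m ∈ l ∧ ∀ t ∈ l, t ≠ m → pvLt low C m t := by
  obtain ⟨h1, _, h3⟩ := pvArgmin_aux low C l none m h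
  refine ⟨?_, h3⟩
  rcases h1 with h' | h'
  · exact absurd h' (by simp)
  · exact h'

-- ---- A's extra-counting loop counts the rest of the greedy match ----
theorem pmatch_take (ws cs : List String) : ws.take (pmatch ws cs) = cs.take (pmatch ws cs) :=
  ((le_pmatch_iff _ _ _).mp le_rfl).2.2

theorem cond_eval (words C : List String) (n : Int) (hn : 0 < n) (hnw : n ≤ (words.length : Int)) (i k : Nat)
    (hiN : i < n.toNat) (hkC : k < C.length) :
    ((PySem.Str.lower (PySem.List.pyGetD words ((i : Nat) : Int) "") == PySem.List.pyGetD C ((k : Nat) : Int) "") = true)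
      ↔ (pvLow words n)[i]? = C[k]? := by
  have hiw : i < words.length := by omega
  rw [pvLow_getElem? words n (by omega) i hiN hiw, List.getElem?_eq_getElem hkC]
  rw [PySem.List.pyGetD_natCast, PySem.List.pyGetD_natCast]
  rw [List.getD_eq_getElem?_getD, List.getD_eq_getElem?_getD]
  rw [List.getElem?_eq_getElem hiw, List.getElem?_eq_getElem hkC]
  simp [beq_iff_eq]

theorem caExtra_eq (words C : List String) (n : Int) (hn : 0 < n) (hnw : n ≤ (words.length : Int))
    (s a : Nat) (d : Nat) :
    ∀ j : Nat, a + j ≤ pvP (pvLow words n) C s → pvP (pvLow words n) C s - (a + j) = d →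
    caExtra words C (s : Int) (a : Int)
      (PySem.List.pyRange (j : Int) (min ((C.length : Int) - (a : Int)) (n - (s : Int) - (a : Int))))
      = ((pvP (pvLow words n) C s - a - j : Nat) : Int) := by
  have hlowlen : (pvLow words n).length = n.toNat := pvLow_length words n (by omega) hnw
  have hple := pmatch_le ((pvLow words n).drop s) C
  have hdrop : ((pvLow words n).drop s).length = n.toNat - s := by
    rw [List.length_drop, hlowlen]
  have hpm : pvP (pvLow words n) C s = pmatch (List.drop s (pvLow words n)) C := rfl
  rw [hpm] at *
  set p := pmatch (List.drop s (pvLow words n)) C with hp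
  induction d with
  | zero =>
    intro j h1 h2
    by_cases hjL : (j : Int) < min ((C.length : Int) - (a : Int)) (n - (s : Int) - (a : Int))
    · obtain ⟨hjL1, hjL2⟩ := lt_min_iff.mp hjL
      rw [PySem.List.pyRange_one_cons hjL]
      have hkC : a + j < C.length := by omega
      have hiN : s + a + j < n.toNat := by omega
      have hc1 : (s : Int) + (a : Int) + (j : Int) = ((s + a + j : Nat) : Int) := by push_cast; ring
      have hc2 : (a : Int) + (j : Int) = ((a + j : Nat) : Int) := by push_cast; ring
      unfold caExtra
      rw [hc1, hc2]
      have hcond := cond_eval words C n hn hnw (s + a + j) (a + j) hiN hkC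
      have hmm : (pvLow words n)[s + a + j]? ≠ C[a + j]? := by
        have hp1 : p < ((pvLow words n).drop s).length := by omega
        have hp2 : p < C.length := by omega
        have hne := pmatch_mismatch ((pvLow words n).drop s) C hp1 hp2
        rw [← hp, List.getElem?_drop] at hne
        have hpaj : s + a + j = s + p := by omega
        rw [hpaj]
        have hpaj2 : a + j = p := by omega
        rw [hpaj2]
        exact hne
      rw [if_neg (by intro hcc; exact hmm (hcond.mp hcc))]
      omega
    · rw [pyRange_nil (by omega)]
      unfold caExtra
      omega
  | succ d' ih =>
    intro j h1 h2
    have h1' : a + j < p := by omega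
    have hjL : (j : Int) < min ((C.length : Int) - (a : Int)) (n - (s : Int) - (a : Int)) := by
      rw [lt_min_iff]
      constructor <;> omega
    rw [PySem.List.pyRange_one_cons hjL]
    have hkC : a + j < C.length := by omega
    have hiN : s + a + j < n.toNat := by omega
    have hc1 : (s : Int) + (a : Int) + (j : Int) = ((s + a + j : Nat) : Int) := by push_cast; ring
    have hc2 : (a : Int) + (j : Int) = ((a + j : Nat) : Int) := by push_cast; ring
    unfold caExtra
    rw [hc1, hc2]
    have hcond := cond_eval words C n hn hnw (s + a + j) (a + j) hiN hkC
    have heq : (pvLow words n)[s + a + j]? = C[a + j]? := by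
      have htk := pmatch_take ((pvLow words n).drop s) C
      rw [← hp] at htk
      have hth : ((pvLow words n).drop s)[a + j]? = C[a + j]? := by
        calc ((pvLow words n).drop s)[a + j]?
            = (((pvLow words n).drop s).take p)[a + j]? := (List.getElem?_take_of_lt h1').symm
          _ = (C.take p)[a + j]? := by rw [htk]
          _ = C[a + j]? := List.getElem?_take_of_lt h1'
      rw [List.getElem?_drop, ← Nat.add_assoc] at hth
      exact hth
    rw [if_pos (hcond.mpr heq)]
    have hstep : (j : Int) + 1 = ((j + 1 : Nat) : Int) := by push_cast; ring
    rw [hstep, ih (j + 1) (by omega) (by omega)]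
    push_cast
    omega

-- ---- candidate list and its key-minimum ----
def pvCl (low C : List String) (N : Nat) : List Nat :=
  (List.range N).filter (fun s => decide (0 < pvP low C s))

def pvBest (low C : List String) (N : Nat) : Option Nat := pvArgmin low C (pvCl low C N)

theorem strC_no_space (x : String) : ∀ t ∈ PySem.Str.split₀ x, ∀ c ∈ t.toList, c ≠ ' ' := by
  intro t ht c hc
  unfold PySem.Str.split₀ at ht
  rcases List.mem_map.mp ht with ⟨t', ht', rfl⟩
  rw [String.toList_ofList] at hc
  exact split₀_no_space _ t' ht' c hc

-- ---- B equals the key-minimum of the candidate starts ----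
theorem B_side (words : List String) (ca_text : String) (n : Int)
    (hC : PySem.Str.split₀ (PySem.Str.lower ca_text) ≠ []) (hn : 0 < n) (hnw : n ≤ (words.length : Int)) :
    ca_anchor_pos_alt words ca_text n =
      (match pvBest (pvLow words n) (PySem.Str.split₀ (PySem.Str.lower ca_text)) n.toNat with
       | some s => (s : Int)
       | none => -1) := by
  have hlowlen : (pvLow words n).length = n.toNat := pvLow_length words n (by omega) hnw
  set C := PySem.Str.split₀ (PySem.Str.lower ca_text) with hCdef
  have hBexpr : ca_anchor_pos_alt words ca_text n =
      (match (List.range ((pvLow words n).length)).foldl (fun best start =>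
          let p := pmatch ((pvLow words n).drop start) C
          if p = 0 then best
          else
            let k := min 6 p
            let key : Int × Int × Int := (-(9 * (k : Int) + (p : Int)), (k : Int), (start : Int))
            match best with
            | none => some key
            | some b => if keyLt key b then some key else best) (none : Option (Int × Int × Int)) with
        | some b => b.2.2
        | none => -1) := by
    unfold ca_anchor_pos_alt
    rw [if_neg (by simp [← hCdef, hC]; omega)]
    rfl
  rw [hBexpr]
  have hfold :
      (List.range ((pvLow words n).length)).foldl (fun best start =>
          let p := pmatch ((pvLow words n).drop start) C
          if p = 0 then best
          else
            let k := min 6 p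
            let key : Int × Int × Int := (-(9 * (k : Int) + (p : Int)), (k : Int), (start : Int))
            match best with
            | none => some key
            | some b => if keyLt key b then some key else best) (none : Option (Int × Int × Int))
      = (List.range ((pvLow words n).length)).foldl (pickStep (pvFB (pvLow words n) C) keyLt) none := by
    apply PySem.List.foldl_congr_mem
    intro acc s _
    show _ = pickStep (pvFB (pvLow words n) C) keyLt acc s
    unfold pickStep pvFB pvKT pvConf pvK pvP
    by_cases hp : 0 < pmatch ((pvLow words n).drop s) C
    · rw [if_pos hp]
      have hp0 : ¬ (pmatch ((pvLow words n).drop s) C = 0) := by omega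
      simp only [if_neg hp0]
      rcases acc with _ | b <;> rfl
    · have hp0 : pmatch ((pvLow words n).drop s) C = 0 := by omega
      rw [if_neg hp]
      simp [hp0]
  rw [hfold, hlowlen]
  rcases hbest : pvBest (pvLow words n) C n.toNat with _ | sstar
  · -- no candidate: every step is a no-op
    have hcl : pvCl (pvLow words n) C n.toNat = [] := by
      by_contra hne
      rcases pvArgmin_some (pvLow words n) C _ hne with ⟨m, hm⟩
      unfold pvBest at hbest
      rw [hbest] at hm
      exact absurd hm (by simp)
    unfold pvCl at hcl
    rw [List.filter_eq_nil_iff] at hcl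
    rw [pick_none _ _ _ _ ?_]
    · intro s hs
      unfold pvFB
      rw [if_neg]
      intro hp
      exact hcl s hs (by simpa using hp)
  · obtain ⟨hmemcl, hminlt⟩ := pvArgmin_spec (pvLow words n) C _ sstar hbest
    have hsN : sstar < n.toNat := by
      have := (List.mem_filter.mp hmemcl).1
      simpa using this
    have hsP : 0 < pvP (pvLow words n) C sstar := by
      have := (List.mem_filter.mp hmemcl).2
      simpa using this
    have hcand : ∀ y : Nat, y ∈ List.range n.toNat → 0 < pvP (pvLow words n) C y →
        y ∈ pvCl (pvLow words n) C n.toNat := by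
      intro y hy hp
      exact List.mem_filter.mpr ⟨hy, by simpa using hp⟩
    obtain ⟨l₁, l₂, hsplit⟩ := List.append_of_mem (List.mem_range.mpr hsN)
    have hpw : List.Pairwise (· < ·) (List.range n.toNat) := List.pairwise_lt_range
    rw [hsplit, List.pairwise_append] at hpw
    have hbefore : ∀ y ∈ l₁, y < sstar := fun y hy => hpw.2.2 y hy sstar (by simp)
    rw [hsplit]
    rw [fold_pick (pvFB (pvLow words n) C) keyLt l₁ l₂ sstar (pvKT (pvLow words n) C sstar) ?_ ?_ ?_]
    · rfl
    · unfold pvFB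
      rw [if_pos hsP]
    · intro y hy u hu
      unfold pvFB at hu
      by_cases hp : 0 < pvP (pvLow words n) C y
      · rw [if_pos hp] at hu
        injection hu with hu
        subst hu
        have hyr : y ∈ List.range n.toNat := by rw [hsplit]; simp [hy]
        have hne : y ≠ sstar := by have := hbefore y hy; omega
        rw [keyLt_iff]
        exact hminlt y (hcand y hyr hp) hne
      · rw [if_neg hp] at hu; cases hu
    · intro y hy u hu
      unfold pvFB at hu
      by_cases hp : 0 < pvP (pvLow words n) C y
      · rw [if_pos hp] at hu
        injection hu with hu
        subst hu
        have hyr : y ∈ List.range n.toNat := by rw [hsplit]; simp [hy]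
        rw [Bool.eq_false_iff]
        intro hlt
        rw [keyLt_iff] at hlt
        by_cases hys : y = sstar
        · subst hys
          unfold pvLt at hlt
          omega
        · exact absurd hlt (by
            intro h'
            have := hminlt y (hcand y hyr hp) hys
            unfold pvLt at this h'
            omega)
      · rw [if_neg hp] at hu; cases hu

-- ---- A's pair list, in visit order ----
def pvPairs (C : List String) (n : Int) : List (Int × Int) :=
  (PySem.List.pyRange 1 (min 7 ((C.length : Int) + 1))).flatMap
    (fun a => (PySem.List.pyRange 0 (n - a + 1)).map (fun st => (a, st)))

def pvPairLt (x y : Int × Int) : Prop := x.1 < y.1 ∨ (x.1 = y.1 ∧ x.2 < y.2)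

def pvG (words C : List String) (n : Int) (acc : Option (Int × Int × Int)) (x : Int × Int) :
    Option (Int × Int × Int) :=
  if PySem.Str.lower (PySem.Str.join " " (PySem.List.slice words (some x.2) (some (x.2 + x.1)))) ==
      PySem.Str.join " " (PySem.List.slice C (some 0) (some x.1)) then
    let extra := caExtra words C x.2 x.1 (PySem.List.pyRange 0 (min ((C.length : Int) - x.1) (n - x.2 - x.1)))
    let conf := x.1 * 10 + extra
    match acc with
    | none => some (x.2, x.1, conf)
    | some b => if conf > b.2.2 then some (x.2, x.1, conf) else acc
  else acc

theorem pvPairs_pairwise (C : List String) (n : Int) : List.Pairwise pvPairLt (pvPairs C n) := by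
  unfold pvPairs
  rw [List.pairwise_flatMap]
  constructor
  · intro a _
    rw [List.pairwise_map]
    exact (pyRange_sorted _ _).imp (fun h => Or.inr ⟨rfl, h⟩)
  · apply (pyRange_sorted _ _).imp
    intro a b hab x hx y hy
    rcases List.mem_map.mp hx with ⟨sx, _, rfl⟩
    rcases List.mem_map.mp hy with ⟨sy, _, rfl⟩
    exact Or.inl hab

theorem mem_pvPairs (C : List String) (n : Int) (x : Int × Int) :
    x ∈ pvPairs C n ↔ 1 ≤ x.1 ∧ x.1 < min 7 ((C.length : Int) + 1) ∧ 0 ≤ x.2 ∧ x.2 < n - x.1 + 1 := by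
  unfold pvPairs
  rw [List.mem_flatMap]
  constructor
  · rintro ⟨a, ha, hx⟩
    rcases List.mem_map.mp hx with ⟨st, hst, rfl⟩
    obtain ⟨ha1, ha2⟩ := PySem.List.mem_pyRange_one.mp ha
    obtain ⟨hs1, hs2⟩ := PySem.List.mem_pyRange_one.mp hst
    exact ⟨ha1, ha2, hs1, hs2⟩
  · rintro ⟨h1, h2, h3, h4⟩
    refine ⟨x.1, PySem.List.mem_pyRange_one.mpr ⟨h1, h2⟩, ?_⟩
    exact List.mem_map.mpr ⟨x.2, PySem.List.mem_pyRange_one.mpr ⟨h3, h4⟩, by simp⟩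

-- ---- A's loop body is the first-pick step on valid pairs ----
theorem pvG_eq_pick (words C : List String) (n : Int)
    (hCsp : ∀ t ∈ C, ∀ c ∈ t.toList, c ≠ ' ')
    (hn : 0 < n) (hnw : n ≤ (words.length : Int)) (x : Int × Int)
    (hx : x ∈ pvPairs C n) (acc : Option (Int × Int × Int)) :
    pvG words C n acc x = pickStep (pvFA (pvLow words n) C) pvReplA acc x := by
  obtain ⟨h1, h2, h3, h4⟩ := (mem_pvPairs C n x).mp hx
  have hlowlen : (pvLow words n).length = n.toNat := pvLow_length words n (by omega) hnw
  have hx1 : x.1 = (x.1.toNat : Int) := by omega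
  have hx2 : x.2 = (x.2.toNat : Int) := by omega
  set aq := x.1.toNat with haq
  set sq := x.2.toNat with hsq
  have haC : aq ≤ C.length := by omega
  have ha6 : aq ≤ 6 := by omega
  have ha1 : 1 ≤ aq := by omega
  have hsa : sq + aq ≤ n.toNat := by omega
  have hsaw : sq + aq ≤ words.length := by omega
  have hiff : aq ≤ pvP (pvLow words n) C sq ↔
      ((words.drop sq).take aq).map PySem.Str.lower = C.take aq := by
    unfold pvP
    rw [le_pmatch_iff]
    constructor
    · rintro ⟨_, _, htk⟩
      rw [pvLow_take words n (by omega) sq aq hsa] at htk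
      exact htk
    · intro htk
      have hdl : ((pvLow words n).drop sq).length = n.toNat - sq := by
        rw [List.length_drop, hlowlen]
      refine ⟨by omega, haC, ?_⟩
      rw [pvLow_take words n (by omega) sq aq hsa]
      exact htk
  by_cases hm : aq ≤ pvP (pvLow words n) C sq
  · -- the anchor matches at this pair
    unfold pvG
    rw [hx1, hx2]
    rw [if_pos ((segEq_iff words C hCsp sq aq hsaw haC).mpr (hiff.mp hm))]
    have hext := caExtra_eq words C n hn hnw sq aq (pvP (pvLow words n) C sq - aq) 0
      (by omega) (by omega)
    rw [Nat.cast_zero] at hext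
    rw [hext]
    have hconf : (aq : Int) * 10 + ((pvP (pvLow words n) C sq - aq - 0 : Nat) : Int)
        = 9 * (aq : Int) + (pvP (pvLow words n) C sq : Int) := by omega
    unfold pickStep pvFA
    rw [if_pos (by
      refine ⟨by omega, ?_⟩
      simp only [← haq, ← hsq]
      exact hm)]
    rcases acc with _ | b
    · simp [hx1, hx2, Int.toNat_natCast, ← hsq]
      omega
    · have hconf2 : ((aq : Int) * 10 + ((pvP (pvLow words n) C sq - aq : Nat) : Int))
          = 9 * (aq : Int) + (pvP (pvLow words n) C sq : Int) := by omega
      by_cases hgt : b.2.2 < 9 * (aq : Int) + (pvP (pvLow words n) C sq : Int)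
      · simp [pvReplA, hx1, hx2, Int.toNat_natCast, ← hsq, hconf2, hgt]
      · simp [pvReplA, hx1, hx2, Int.toNat_natCast, ← hsq, hconf2, hgt]
  · -- no match: both sides keep the accumulator
    unfold pvG
    rw [hx1, hx2]
    rw [if_neg (fun hcc => hm (hiff.mpr ((segEq_iff words C hCsp sq aq hsaw haC).mp hcc)))]
    unfold pickStep pvFA
    rw [if_neg (by
      rintro ⟨_, hle⟩
      rw [← haq, ← hsq] at hle
      exact hm hle)]

-- ---- A equals the key-minimum of the candidate starts ----
theorem A_expr (words : List String) (ca_text : String) (n : Int)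
    (hC : PySem.Str.split₀ (PySem.Str.lower ca_text) ≠ []) :
    ca_anchor_pos words ca_text n =
      (match (pvPairs (PySem.Str.split₀ (PySem.Str.lower ca_text)) n).foldl
          (pvG words (PySem.Str.split₀ (PySem.Str.lower ca_text)) n) none with
       | some b => b.1
       | none => -1) := by
  set C := PySem.Str.split₀ (PySem.Str.lower ca_text) with hCdef
  have hAexpr : ca_anchor_pos words ca_text n =
      (match (PySem.List.pyRange 1 (min 7 ((C.length : Int) + 1))).foldl (fun best n_try =>
          let anchor := PySem.Str.join " " (PySem.List.slice C (some 0) (some n_try))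
          (PySem.List.pyRange 0 (n - n_try + 1)).foldl (fun best start =>
            if PySem.Str.lower (PySem.Str.join " " (PySem.List.slice words (some start) (some (start + n_try)))) == anchor then
              let extra := caExtra words C start n_try
                (PySem.List.pyRange 0 (min ((C.length : Int) - n_try) (n - start - n_try)))
              let conf := n_try * 10 + extra
              match best with
              | none => some (start, n_try, conf)
              | some b => if conf > b.2.2 then some (start, n_try, conf) else best
            else best) best) (none : Option (Int × Int × Int)) with
        | some b => b.1
        | none => -1) := by
    unfold ca_anchor_pos
    rw [if_neg (by simp [← hCdef, hC])]
  rw [hAexpr]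
  have hfolds : (PySem.List.pyRange 1 (min 7 ((C.length : Int) + 1))).foldl (fun best n_try =>
          let anchor := PySem.Str.join " " (PySem.List.slice C (some 0) (some n_try))
          (PySem.List.pyRange 0 (n - n_try + 1)).foldl (fun best start =>
            if PySem.Str.lower (PySem.Str.join " " (PySem.List.slice words (some start) (some (start + n_try)))) == anchor then
              let extra := caExtra words C start n_try
                (PySem.List.pyRange 0 (min ((C.length : Int) - n_try) (n - start - n_try)))
              let conf := n_try * 10 + extra
              match best with
              | none => some (start, n_try, conf)
              | some b => if conf > b.2.2 then some (start, n_try, conf) else best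
            else best) best) (none : Option (Int × Int × Int))
      = (pvPairs C n).foldl (pvG words C n) none := by
    unfold pvPairs
    rw [List.foldl_flatMap]
    apply PySem.List.foldl_congr_mem
    intro acc a _
    rw [List.foldl_map]
    rfl
  rw [hfolds]

set_option maxHeartbeats 4000000 in
theorem A_side (words : List String) (ca_text : String) (n : Int)
    (hC : PySem.Str.split₀ (PySem.Str.lower ca_text) ≠ []) (hn : 0 < n) (hnw : n ≤ (words.length : Int)) :
    ca_anchor_pos words ca_text n =
      (match pvBest (pvLow words n) (PySem.Str.split₀ (PySem.Str.lower ca_text)) n.toNat with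
       | some s => (s : Int)
       | none => -1) := by
  have hCsp := strC_no_space (PySem.Str.lower ca_text)
  set C := PySem.Str.split₀ (PySem.Str.lower ca_text) with hCdef
  have hlowlen : (pvLow words n).length = n.toNat := pvLow_length words n (by omega) hnw
  rw [A_expr words ca_text n hC]
  rw [PySem.List.foldl_congr_mem _ _ (pickStep (pvFA (pvLow words n) C) pvReplA) _
    (fun acc x hx => pvG_eq_pick words C n hCsp hn hnw x hx acc)]
  have hPle : ∀ s : Nat, pvP (pvLow words n) C s ≤ C.length ∧ pvP (pvLow words n) C s ≤ n.toNat - s := by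
    intro s
    have h := pmatch_le ((pvLow words n).drop s) C
    have hd : ((pvLow words n).drop s).length = n.toNat - s := by
      rw [List.length_drop, hlowlen]
    unfold pvP
    omega
  rcases hbest : pvBest (pvLow words n) C n.toNat with _ | sstar
  · -- no candidate anywhere: the fold is a no-op
    have hcl : pvCl (pvLow words n) C n.toNat = [] := by
      by_contra hne
      rcases pvArgmin_some (pvLow words n) C _ hne with ⟨m, hm⟩
      unfold pvBest at hbest
      rw [hbest] at hm
      exact absurd hm (by simp)
    unfold pvCl at hcl
    rw [List.filter_eq_nil_iff] at hcl
    rw [pick_none _ _ _ _ ?_]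
    · intro x hx
      obtain ⟨h1, h2, h3, h4⟩ := (mem_pvPairs C n x).mp hx
      unfold pvFA
      rw [if_neg]
      rintro ⟨_, hle⟩
      have hsN : x.2.toNat < n.toNat := by omega
      refine hcl x.2.toNat (List.mem_range.mpr hsN) ?_
      simp only [decide_eq_true_eq]
      omega
  · obtain ⟨hmemcl, hminlt⟩ := pvArgmin_spec (pvLow words n) C _ sstar hbest
    have hsN : sstar < n.toNat := by
      have := (List.mem_filter.mp hmemcl).1
      simpa using this
    have hsP : 0 < pvP (pvLow words n) C sstar := by
      have := (List.mem_filter.mp hmemcl).2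
      simpa using this
    have hcand : ∀ y : Nat, y < n.toNat → 0 < pvP (pvLow words n) C y →
        y ∈ pvCl (pvLow words n) C n.toNat := by
      intro y hy hp
      exact List.mem_filter.mpr ⟨List.mem_range.mpr hy, by simpa using hp⟩
    have hkb := hPle sstar
    have hk1 : 1 ≤ pvK (pvLow words n) C sstar := by unfold pvK; omega
    have hk6 : pvK (pvLow words n) C sstar ≤ 6 := by unfold pvK; omega
    have hkP : pvK (pvLow words n) C sstar ≤ pvP (pvLow words n) C sstar := by unfold pvK; omega
    have hxmem : ((pvK (pvLow words n) C sstar : Int), (sstar : Int)) ∈ pvPairs C n := by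
      rw [mem_pvPairs]
      refine ⟨by omega, by omega, by omega, by omega⟩
    obtain ⟨l₁, l₂, hsplit⟩ := List.append_of_mem hxmem
    have hpw := pvPairs_pairwise C n
    rw [hsplit, List.pairwise_append] at hpw
    have hbefore : ∀ y ∈ l₁, pvPairLt y ((pvK (pvLow words n) C sstar : Int), (sstar : Int)) :=
      fun y hy => hpw.2.2 y hy _ (by simp)
    rw [hsplit]
    rw [fold_pick (pvFA (pvLow words n) C) pvReplA l₁ l₂ _
      (((sstar : Int), ((pvK (pvLow words n) C sstar : Int), 9 * (pvK (pvLow words n) C sstar : Int) + (pvP (pvLow words n) C sstar : Int)))) ?hx ?hone ?htwo]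
    case hx =>
      unfold pvFA
      rw [if_pos (by refine ⟨by omega, ?_⟩; simp; omega)]
      simp
    case hone =>
      intro y hy u hu
      unfold pvFA at hu
      by_cases hcondy : 1 ≤ y.1 ∧ y.1.toNat ≤ pvP (pvLow words n) C y.2.toNat
      · rw [if_pos hcondy] at hu
        injection hu with hu
        subst hu
        have hymem : y ∈ pvPairs C n := by rw [hsplit]; simp [hy]
        obtain ⟨hy1, hy2, hy3, hy4⟩ := (mem_pvPairs C n y).mp hymem
        have hlty := hbefore y hy
        have hyb := hPle y.2.toNat
        have hysN : y.2.toNat < n.toNat := by omega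
        have hak : y.1.toNat ≤ pvK (pvLow words n) C y.2.toNat := by unfold pvK; omega
        simp only [pvReplA, decide_eq_true_eq]
        unfold pvPairLt at hlty
        by_cases hss : y.2.toNat = sstar
        · rw [hss] at hcondy hak
          rw [hss]
          rcases hlty with hA | ⟨hA, hB⟩
          · omega
          · exfalso
            omega
        · have hltP := hminlt y.2.toNat (hcand y.2.toNat hysN (by omega)) hss
          unfold pvLt pvConf at hltP
          rcases hltP with hA | ⟨hA, hB⟩
          · omega
          · rcases hB with hB | ⟨hB, hcc⟩
            · rcases hlty with hD | ⟨hD, hE⟩ <;> omega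
            · rcases hlty with hD | ⟨hD, hE⟩
              · omega
              · exfalso
                omega
      · rw [if_neg hcondy] at hu
        cases hu
    case htwo =>
      intro y hy u hu
      unfold pvFA at hu
      by_cases hcondy : 1 ≤ y.1 ∧ y.1.toNat ≤ pvP (pvLow words n) C y.2.toNat
      · rw [if_pos hcondy] at hu
        injection hu with hu
        subst hu
        have hymem : y ∈ pvPairs C n := by rw [hsplit]; simp [hy]
        obtain ⟨hy1, hy2, hy3, hy4⟩ := (mem_pvPairs C n y).mp hymem
        have hyb := hPle y.2.toNat
        have hysN : y.2.toNat < n.toNat := by omega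
        have hak : y.1.toNat ≤ pvK (pvLow words n) C y.2.toNat := by unfold pvK; omega
        simp only [pvReplA, decide_eq_false_iff_not, not_lt]
        by_cases hss : y.2.toNat = sstar
        · rw [hss] at hcondy hak
          rw [hss]
          omega
        · have hltP := hminlt y.2.toNat (hcand y.2.toNat hysN (by omega)) hss
          unfold pvLt pvConf at hltP
          rcases hltP with hA | ⟨hA, hB⟩
          · omega
          · omega
      · rw [if_neg hcondy] at hu
        cases hu

-- ===== VERDICT (by name: the statement is the Claim_ definition above) =====
theorem ca_anchor_pos_spec : Claim_equal_ca_anchor_pos := by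
  intro words ca_text n _ hpre
  unfold Spec_ca_anchor_pos
  by_cases hC : PySem.Str.split₀ (PySem.Str.lower ca_text) = []
  · unfold ca_anchor_pos ca_anchor_pos_alt
    rw [if_pos (by simp [hC]), if_pos (by simp [hC])]
  · by_cases hn : n ≤ 0
    · -- every inner range of A is empty, and B returns -1 up front
      rw [A_expr words ca_text n hC]
      have hpairs : pvPairs (PySem.Str.split₀ (PySem.Str.lower ca_text)) n = [] := by
        rw [List.eq_nil_iff_forall_not_mem]
        intro x hx
        obtain ⟨h1, h2, h3, h4⟩ := (mem_pvPairs _ n x).mp hx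
        omega
      rw [hpairs]
      unfold ca_anchor_pos_alt
      rw [if_pos (by simp; omega)]
      rfl
    · have hnw : n ≤ (words.length : Int) := by
        rcases hpre with h | h
        · exact h
        · exact absurd h hC
      rw [A_side words ca_text n hC (by omega) hnw, B_side words ca_text n hC (by omega) hnw]
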